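-- pv_equiv track=rewrite | github.com/KB-Algo-holic/APS | assignments/week35/basic/PGM_131704_HJW.py | solution
-- ===== SOURCE A (Python) =====
-- from collections import deque
--
-- def solution(order):
--     answer = 0
--
--     stack = []
--     queue = deque()
--
--     for i in range(1, len(order)+1):
--         queue.append(i)
--
--     for num in order:
--
--         flag = 1
--         while True:
--             if queue and queue[0] == num:
--                 queue.popleft()
--                 answer += 1
--                 break
--
--             if stack and stack[-1] == num:
--                 stack.pop()
--                 answer += 1
--                 break
--
--             if queue and queue[0] < num:
--                 stack.append(queue.popleft())
--
--             else:
--                 flag = 0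
--                 break
--
--         if not flag:
--             break
--
--     return answer
-- ===== SOURCE B (Python) =====
-- def solution(order):
--     # Stackless reformulation: track the set of already-delivered boxes and the
--     # high-water mark hi (largest box taken from the belt).  A box num can be
--     # loaded iff it is the next new box from the belt (hi < num <= n) or it is
--     # the largest not-yet-delivered box below hi (i.e. num is undelivered and
--     # every box in (num, hi] is already delivered).  The answer is the index of
--     # the first box that fails, or n if none does.
--     done = set()
--     hi = 0
--     n = len(order)
--     for i, num in enumerate(order):
--         if hi < num <= n:
--             done.add(num)
--             hi = num
--         elif 1 <= num <= hi and num not in done and all(x in done for x in range(num + 1, hi + 1)):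
--             done.add(num)
--         else:
--             return i
--     return n
-- ===== Notes on version B (the rewrite author's own statement) =====
-- stated objective: alternative
-- what changed: Removes the queue/stack simulation entirely: B keeps a set of already-delivered numbers plus a high-water mark and accepts an element iff it is the next fresh number or the largest undelivered number below the mark (checked by a range scan), returning the index of the first failure; correctness rests on the invariant that A's stack is exactly the undelivered numbers below the mark in decreasing order.
import Mathlib
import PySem

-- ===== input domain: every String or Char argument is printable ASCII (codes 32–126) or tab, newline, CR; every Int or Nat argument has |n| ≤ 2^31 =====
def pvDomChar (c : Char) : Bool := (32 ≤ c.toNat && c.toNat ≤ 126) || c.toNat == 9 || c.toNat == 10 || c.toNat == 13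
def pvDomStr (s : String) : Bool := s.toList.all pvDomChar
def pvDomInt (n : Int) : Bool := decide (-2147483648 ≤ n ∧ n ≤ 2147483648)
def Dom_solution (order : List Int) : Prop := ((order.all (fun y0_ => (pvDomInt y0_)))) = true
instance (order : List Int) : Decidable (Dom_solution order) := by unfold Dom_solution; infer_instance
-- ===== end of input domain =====

-- B replaces A's queue/stack simulation by a stackless scan keeping a set of
-- already-delivered numbers and a high-water mark (alternative decomposition).

-- ===== PORT A =====
-- the inner `while True`: returns the new (queue, stack) on success (answer += 1), none on flag = 0.
-- Lists model the deque/stack with the head as queue-front resp. stack-top;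
-- `l ≠ [] ∧ l.head! = num` transcribes Python's `l and l[0] == num` / `l and l[-1] == num`.
def whileA (num : Int) (queue stack : List Int) : Option (List Int × List Int) :=
  if queue ≠ [] ∧ queue.head! = num then some (queue.tail, stack)
  else if stack ≠ [] ∧ stack.head! = num then some (queue, stack.tail)
  else if h : queue ≠ [] ∧ queue.head! < num then whileA num queue.tail (queue.head! :: stack)
  else none
termination_by queue.length
decreasing_by
  rcases queue with _ | ⟨q, qs⟩
  · exact absurd rfl h.1
  · simp

def loopA : List Int → List Int → List Int → Int → Int
  | [], _, _, answer => answer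
  | num :: rest, queue, stack, answer =>
      match whileA num queue stack with
      | some (q', s') => loopA rest q' s' (answer + 1)
      | none => answer

def solution (order : List Int) : Int :=
  loopA order ((List.range order.length).map (fun i : ℕ => (i : Int) + 1)) [] 0

-- ===== PORT B =====
-- Source B's loop: `done` is the Python set, `hi` the high-water mark, `i` the enumerate index;
-- on exhaustion Python returns n. `num not in done` is `num ∉ done`, the `all(... for x in
-- range(num+1, hi+1))` generator is the bounded quantifier over PySem.List.pyRange.
def loopB (n : Int) : List Int → Int → PySem.Set Int → Int → Int
  | [], _, _, _ => n
  | num :: rest, hi, done, i =>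
      if hi < num ∧ num ≤ n then
        loopB n rest num (PySem.Set.add done num) (i + 1)
      else if 1 ≤ num ∧ num ≤ hi ∧ num ∉ done ∧
              ∀ x ∈ PySem.List.pyRange (num + 1) (hi + 1) 1, x ∈ done then
        loopB n rest hi (PySem.Set.add done num) (i + 1)
      else i

def solution_alt (order : List Int) : Int :=
  loopB order.length order 0 PySem.Set.empty 0

-- ===== PRECONDITION & SPEC =====
def Spec_solution (order : List Int) (out : Int) : Prop := out = solution_alt order
instance (order : List Int) (out : Int) : Decidable (Spec_solution order out) := by unfold Spec_solution; infer_instance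

-- ===== CLAIM (what is proved, stated in full; the proofs are below) =====
def Claim_equal_solution : Prop := ∀ (order : List Int), Dom_solution order → Spec_solution order (solution order)

-- ===== LEMMAS AND PROOFS =====

-- the remaining queue, as a function of the high-water mark hi (front = hi+1)
def Q (cur n : Int) : List Int := (List.range (n + 1 - cur).toNat).map (fun i : ℕ => cur + (i : Int))

-- [hi, hi-1, ..., 1]
def descList (hi : Int) : List Int := (List.range hi.toNat).map (fun i : ℕ => hi - (i : Int))

-- A's stack as a function of B's state: undelivered numbers ≤ hi, top (= head) largest
def D (hi : Int) (done : List Int) : List Int :=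
  (descList hi).filter (fun x => decide (x ∉ done))

-- [num-1, ..., cur] : the segment A pushes while advancing the queue from cur to num
def pushSeg (cur num : Int) : List Int := (List.range (num - cur).toNat).map (fun i : ℕ => num - 1 - (i : Int))

-- Source B's acceptance condition for an already-passed number, pyRange unfolded
def Bcond (num hi : Int) (done : List Int) : Prop :=
  1 ≤ num ∧ num ≤ hi ∧ num ∉ done ∧ ∀ x : Int, num < x → x ≤ hi → x ∈ done

theorem Q_nil (cur n : Int) (h : n < cur) : Q cur n = [] := by
  unfold Q
  have : (n + 1 - cur).toNat = 0 := by omega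
  simp [this]

theorem Q_cons (cur n : Int) (h : cur ≤ n) : Q cur n = cur :: Q (cur + 1) n := by
  unfold Q
  have h1 : (n + 1 - cur).toNat = (n + 1 - (cur + 1)).toNat + 1 := by omega
  rw [h1, List.range_succ_eq_map, List.map_cons, List.map_map]
  refine congrArg₂ _ (by simp) ?_
  apply List.map_congr_left
  intro a _
  simp [Function.comp]
  ring

theorem descList_nil (hi : Int) (h : hi ≤ 0) : descList hi = [] := by
  unfold descList
  have : hi.toNat = 0 := by omega
  simp [this]

theorem descList_cons (hi : Int) (h : 1 ≤ hi) : descList hi = hi :: descList (hi - 1) := by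
  unfold descList
  have h1 : hi.toNat = (hi - 1).toNat + 1 := by omega
  rw [h1, List.range_succ_eq_map, List.map_cons, List.map_map]
  refine congrArg₂ _ (by simp) ?_
  apply List.map_congr_left
  intro a _
  simp [Function.comp]
  ring

theorem mem_descList {x hi : Int} (h : x ∈ descList hi) : 1 ≤ x ∧ x ≤ hi := by
  unfold descList at h
  simp at h
  obtain ⟨i, hi1, rfl⟩ := h
  omega

theorem mem_D {x hi : Int} {done : List Int} (h : x ∈ D hi done) : 1 ≤ x ∧ x ≤ hi := by
  unfold D at h
  exact mem_descList (List.mem_of_mem_filter h)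

theorem pushSeg_nil (cur num : Int) (h : num ≤ cur) : pushSeg cur num = [] := by
  unfold pushSeg
  have : (num - cur).toNat = 0 := by omega
  simp [this]

theorem pushSeg_snoc (cur num : Int) (h : cur < num) :
    pushSeg cur num = pushSeg (cur + 1) num ++ [cur] := by
  unfold pushSeg
  have h1 : (num - cur).toNat = (num - (cur + 1)).toNat + 1 := by omega
  rw [h1, List.range_succ, List.map_append]
  simp
  omega

theorem D_irrel (hi num : Int) (done : List Int) (h : hi < num) :
    D hi (PySem.Set.add done num) = D hi done := by
  unfold D
  apply List.filter_congr
  intro x hx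
  have hb := mem_descList hx
  simp [PySem.Set.mem_add]
  omega

-- pushing hi+1 .. num-1 and delivering num: B's new state describes A's new stack
theorem D_push (num : Int) (done : List Int) (hdone : ∀ x ∈ done, x ≤ num - 1) :
    ∀ (k : ℕ) (hi : Int), (num - 1 - hi).toNat = k → 0 ≤ hi → hi ≤ num - 1 →
    (∀ x ∈ done, x ≤ hi) →
    D (num - 1) (PySem.Set.add done num) = pushSeg (hi + 1) num ++ D hi done := by
  intro k
  induction k with
  | zero =>
      intro hi hk h0 hle hd
      have : hi = num - 1 := by omega
      subst this
      rw [pushSeg_nil _ _ (by omega), List.nil_append]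
      exact D_irrel _ _ _ (by omega)
  | succ k ih =>
      intro hi hk h0 hle hd
      have hlt : hi < num - 1 := by omega
      have step : D (num - 1) (PySem.Set.add done num) = pushSeg (hi + 1 + 1) num ++ D (hi + 1) done := by
        refine ih (hi + 1) (by omega) (by omega) (by omega) ?_
        intro x hx; have := hd x hx; omega
      rw [step]
      have hD : D (hi + 1) done = (hi + 1) :: D hi done := by
        unfold D
        rw [descList_cons (hi + 1) (by omega)]
        have hni : (hi + 1) ∉ done := fun hmem => by have := hd _ hmem; omega
        simp [hni]
      rw [hD, pushSeg_snoc (hi + 1) num (by omega)]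
      simp

theorem Bcond_iff (num hi : Int) (done : List Int) :
    (1 ≤ num ∧ num ≤ hi ∧ num ∉ done ∧
      ∀ x ∈ PySem.List.pyRange (num + 1) (hi + 1) 1, x ∈ done) ↔ Bcond num hi done := by
  unfold Bcond
  simp only [PySem.List.mem_pyRange_one]
  constructor
  · rintro ⟨h1, h2, h3, h4⟩
    exact ⟨h1, h2, h3, fun x hx1 hx2 => h4 x ⟨by omega, by omega⟩⟩
  · rintro ⟨h1, h2, h3, h4⟩
    exact ⟨h1, h2, h3, fun x hx => h4 x (by omega) (by omega)⟩

theorem D_head (num : Int) (done : List Int) :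
    ∀ (k : ℕ) (hi : Int), hi.toNat = k → 0 ≤ hi → Bcond num hi done →
    D hi done = num :: D hi (PySem.Set.add done num) := by
  intro k
  induction k with
  | zero =>
      intro hi hk h0 hB
      exact absurd hB (by unfold Bcond; omega)
  | succ k ih =>
      intro hi hk h0 hB
      obtain ⟨h1, h2, h3, h4⟩ := hB
      by_cases hcase : num = hi
      · subst hcase
        have hcong : D (num - 1) (PySem.Set.add done num) = D (num - 1) done := by
          unfold D
          apply List.filter_congr
          intro x hx
          have := mem_descList hx
          simp [PySem.Set.mem_add]
          omega
        have eL : D num done = num :: D (num - 1) done := by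
          unfold D; rw [descList_cons num (by omega)]; simp [h3]
        have eR : D num (PySem.Set.add done num) = D (num - 1) (PySem.Set.add done num) := by
          unfold D; rw [descList_cons num (by omega)]; simp
        rw [eL, eR, hcong]
      · have hlt : num < hi := by omega
        have hhi : hi ∈ done := h4 hi hlt (le_refl _)
        have e1 : D hi done = D (hi - 1) done := by
          unfold D; rw [descList_cons hi (by omega)]; simp [hhi]
        have e2 : D hi (PySem.Set.add done num) = D (hi - 1) (PySem.Set.add done num) := by
          unfold D; rw [descList_cons hi (by omega)]; simp [hhi]
        rw [e1, e2]
        exact ih (hi - 1) (by omega) (by omega)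
          ⟨h1, by omega, h3, fun x hx1 hx2 => h4 x hx1 (by omega)⟩

theorem D_head_inv (num : Int) (done : List Int) :
    ∀ (k : ℕ) (hi : Int), hi.toNat = k → 0 ≤ hi →
    ∀ t : List Int, D hi done = num :: t → Bcond num hi done := by
  intro k
  induction k with
  | zero =>
      intro hi hk h0 t ht
      have : hi = 0 := by omega
      subst this
      rw [show D 0 done = [] by unfold D; rw [descList_nil 0 (by omega)]; rfl] at ht
      exact absurd ht (by simp)
  | succ k ih =>
      intro hi hk h0 t ht
      by_cases hmem : hi ∈ done
      · have e1 : D hi done = D (hi - 1) done := by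
          unfold D; rw [descList_cons hi (by omega)]; simp [hmem]
        rw [e1] at ht
        obtain ⟨h1, h2, h3, h4⟩ := ih (hi - 1) (by omega) (by omega) t ht
        refine ⟨h1, by omega, h3, fun x hx1 hx2 => ?_⟩
        by_cases hx : x = hi
        · subst hx; exact hmem
        · exact h4 x hx1 (by omega)
      · have e1 : D hi done = hi :: D (hi - 1) done := by
          unfold D; rw [descList_cons hi (by omega)]; simp [hmem]
        rw [e1] at ht
        injection ht with hh _
        subst hh
        exact ⟨by omega, le_refl _, hmem, fun x hx1 hx2 => absurd hx1 (by omega)⟩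

theorem whileA_advance (num n : Int) (hnum : num ≤ n) :
    ∀ (k : ℕ) (cur : Int) (stack : List Int), (num - cur).toNat = k → cur ≤ num →
    (∀ x ∈ stack, x < cur) →
    whileA num (Q cur n) stack = some (Q (num + 1) n, pushSeg cur num ++ stack) := by
  intro k
  induction k with
  | zero =>
      intro cur stack hk hcur hst
      have : cur = num := by omega
      subst this
      rw [Q_cons cur n (by omega), whileA]
      rw [if_pos (by simp)]
      rw [pushSeg_nil cur cur (le_refl _)]
      simp
  | succ k ih =>
      intro cur stack hk hcur hst
      have hlt : cur < num := by omega
      rw [Q_cons cur n (by omega), whileA]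
      have c1 : ¬ ((cur :: Q (cur + 1) n) ≠ [] ∧ (cur :: Q (cur + 1) n).head! = num) := by
        simp; omega
      have c2 : ¬ (stack ≠ [] ∧ stack.head! = num) := by
        rintro ⟨hne, hhd⟩
        rcases stack with _ | ⟨s, ss⟩
        · exact hne rfl
        · simp at hhd; have := hst s (by simp); omega
      have c3 : (cur :: Q (cur + 1) n) ≠ [] ∧ (cur :: Q (cur + 1) n).head! < num := by
        simp [hlt]
      rw [if_neg c1, if_neg c2, dif_pos c3]
      simp only [List.tail_cons, List.head!_cons]
      rw [ih (cur + 1) (cur :: stack) (by omega) (by omega)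
        (by intro x hx
            rcases List.mem_cons.1 hx with rfl | hx
            · omega
            · exact lt_trans (hst x hx) (by omega))]
      rw [pushSeg_snoc cur num hlt]
      simp

theorem whileA_overflow (num n : Int) (hnum : n < num) :
    ∀ (k : ℕ) (cur : Int) (stack : List Int), (n + 1 - cur).toNat = k →
    (∀ x ∈ stack, x < num) →
    whileA num (Q cur n) stack = none := by
  intro k
  induction k with
  | zero =>
      intro cur stack hk hst
      rw [Q_nil cur n (by omega), whileA]
      have c2 : ¬ (stack ≠ [] ∧ stack.head! = num) := by
        rintro ⟨hne, hhd⟩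
        rcases stack with _ | ⟨s, ss⟩
        · exact hne rfl
        · simp at hhd; have := hst s (by simp); omega
      simp [c2]
  | succ k ih =>
      intro cur stack hk hst
      have hcur : cur ≤ n := by omega
      rw [Q_cons cur n hcur, whileA]
      have c1 : ¬ ((cur :: Q (cur + 1) n) ≠ [] ∧ (cur :: Q (cur + 1) n).head! = num) := by
        simp; omega
      have c2 : ¬ (stack ≠ [] ∧ stack.head! = num) := by
        rintro ⟨hne, hhd⟩
        rcases stack with _ | ⟨s, ss⟩
        · exact hne rfl
        · simp at hhd; have := hst s (by simp); omega
      have c3 : (cur :: Q (cur + 1) n) ≠ [] ∧ (cur :: Q (cur + 1) n).head! < num := by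
        simp; omega
      rw [if_neg c1, if_neg c2, dif_pos c3]
      simp only [List.tail_cons, List.head!_cons]
      exact ih (cur + 1) (cur :: stack) (by omega)
        (by intro x hx
            rcases List.mem_cons.1 hx with rfl | hx
            · omega
            · exact hst x hx)

theorem whileA_stack (num n cur : Int) (h : num < cur) (stack : List Int) :
    whileA num (Q cur n) stack =
      if stack ≠ [] ∧ stack.head! = num then some (Q cur n, stack.tail) else none := by
  rw [whileA]
  by_cases hq : cur ≤ n
  · have hQ : Q cur n = cur :: Q (cur + 1) n := Q_cons cur n hq
    have c1 : ¬ (Q cur n ≠ [] ∧ (Q cur n).head! = num) := by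
      rw [hQ]; simp; omega
    have c3 : ¬ (Q cur n ≠ [] ∧ (Q cur n).head! < num) := by
      rw [hQ]; simp; omega
    rw [if_neg c1]
    by_cases hs : stack ≠ [] ∧ stack.head! = num
    · rw [if_pos hs, if_pos hs]
    · rw [if_neg hs, if_neg hs, dif_neg c3]
  · have hQ : Q cur n = [] := Q_nil cur n (by omega)
    have c1 : ¬ (Q cur n ≠ [] ∧ (Q cur n).head! = num) := by rw [hQ]; simp
    have c3 : ¬ (Q cur n ≠ [] ∧ (Q cur n).head! < num) := by rw [hQ]; simp
    rw [if_neg c1]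
    by_cases hs : stack ≠ [] ∧ stack.head! = num
    · rw [if_pos hs, if_pos hs]
    · rw [if_neg hs, if_neg hs, dif_neg c3]

theorem loop_eq (n : Int) : ∀ (rest : List Int) (hi : Int) (done : List Int) (i : Int),
    0 ≤ hi → hi ≤ n → (∀ x ∈ done, x ≤ hi) → i + rest.length = n →
    loopA rest (Q (hi + 1) n) (D hi done) i = loopB n rest hi done i := by
  intro rest
  induction rest with
  | nil =>
      intro hi done i h0 hn hd hlen
      simp at hlen
      simp only [loopA, loopB]
      omega
  | cons num rest ih =>
      intro hi done i h0 hn hd hlen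
      simp only [List.length_cons] at hlen
      rw [loopA, loopB]
      by_cases hb1 : hi < num ∧ num ≤ n
      · rw [if_pos hb1]
        rw [whileA_advance num n hb1.2 (num - (hi + 1)).toNat (hi + 1) (D hi done) rfl
          (by omega) (fun x hx => by have := mem_D hx; omega)]
        have hDnum : D num (PySem.Set.add done num) = D (num - 1) (PySem.Set.add done num) := by
          unfold D; rw [descList_cons num (by omega)]; simp
        have hps := D_push num done (fun x hx => by have := hd x hx; omega)
          (num - 1 - hi).toNat hi rfl h0 (by omega) hd
        rw [show pushSeg (hi + 1) num ++ D hi done = D num (PySem.Set.add done num) from by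
          rw [hDnum, hps]]
        exact ih num (PySem.Set.add done num) (i + 1) (by omega) hb1.2
          (by intro x hx
              rcases (PySem.Set.mem_add _ _ _).1 hx with hx | rfl
              · have := hd x hx; omega
              · exact le_refl _)
          (by omega)
      · rw [if_neg hb1]
        by_cases hb2 : 1 ≤ num ∧ num ≤ hi ∧ num ∉ done ∧
            ∀ x ∈ PySem.List.pyRange (num + 1) (hi + 1) 1, x ∈ done
        · rw [if_pos hb2]
          have hB : Bcond num hi done := (Bcond_iff num hi done).1 hb2
          have hD := D_head num done hi.toNat hi rfl h0 hB
          have hcond : D hi done ≠ [] ∧ (D hi done).head! = num := by rw [hD]; simp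
          have htail : (D hi done).tail = D hi (PySem.Set.add done num) := by rw [hD]; rfl
          rw [whileA_stack num n (hi + 1) (by omega) (D hi done), if_pos hcond, htail]
          exact ih hi (PySem.Set.add done num) (i + 1) h0 hn
            (by intro x hx
                rcases (PySem.Set.mem_add _ _ _).1 hx with hx | rfl
                · exact hd x hx
                · omega)
            (by omega)
        · rw [if_neg hb2]
          by_cases hcase : hi < num
          · have hnlt : n < num := by omega
            rw [whileA_overflow num n hnlt (n + 1 - (hi + 1)).toNat (hi + 1) (D hi done) rfl
              (fun x hx => by have := mem_D hx; omega)]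
          · rw [whileA_stack num n (hi + 1) (by omega) (D hi done), if_neg ?hneg]
            case hneg =>
              rintro ⟨hne, hhd⟩
              obtain ⟨a, t, hat⟩ := List.exists_cons_of_ne_nil hne
              rw [hat] at hhd
              simp at hhd
              subst hhd
              have hB := D_head_inv a done hi.toNat hi rfl h0 t hat
              exact hb2 ((Bcond_iff a hi done).2 hB)

theorem Q_one (n : ℕ) : Q 1 n = (List.range n).map (fun i : ℕ => (i : Int) + 1) := by
  unfold Q
  have : ((n : Int) + 1 - 1).toNat = n := by omega
  rw [this]
  apply List.map_congr_left
  intro a _; ring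

-- ===== VERDICT (by name: the statement is the Claim_ definition above) =====
theorem solution_spec : Claim_equal_solution := by
  intro order _
  unfold Spec_solution solution solution_alt
  rw [← Q_one order.length]
  have h := loop_eq order.length order 0 PySem.Set.empty 0 (by omega) (by omega)
    (by intro x hx; simp [PySem.Set.empty] at hx) (by simp)
  simpa [D, descList] using h
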